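-- pv_equiv track=rewrite | github.com/darrida/Sample-Record-Generator | generate_sample_audit_data.py | find_int_gaps
-- ===== SOURCE A (Python) =====
-- def find_int_gaps(int_set: list, position: int = 1) -> int:
--     gap = False
--     while gap == False:
--         if position in int_set:
--             position += 1
--         else:
--             return position
--             gap == True
--     return position + 1
-- ===== SOURCE B (Python) =====
-- def find_int_gaps(int_set: list, position: int = 1) -> int:
--     expected = position
--     for v in sorted(x for x in int_set if x >= position):
--         if v == expected:
--             expected += 1
--         elif v > expected:
--             break
--         # v < expected: duplicate already passed, skip
--     return expected
-- ===== Notes on version B (the rewrite author's own statement) =====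
-- stated objective: alternative
-- what changed: A probes upward from position with a list membership test per step; B sorts the elements >= position once and finds the first gap in a single pass with an expected counter.
import Mathlib
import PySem

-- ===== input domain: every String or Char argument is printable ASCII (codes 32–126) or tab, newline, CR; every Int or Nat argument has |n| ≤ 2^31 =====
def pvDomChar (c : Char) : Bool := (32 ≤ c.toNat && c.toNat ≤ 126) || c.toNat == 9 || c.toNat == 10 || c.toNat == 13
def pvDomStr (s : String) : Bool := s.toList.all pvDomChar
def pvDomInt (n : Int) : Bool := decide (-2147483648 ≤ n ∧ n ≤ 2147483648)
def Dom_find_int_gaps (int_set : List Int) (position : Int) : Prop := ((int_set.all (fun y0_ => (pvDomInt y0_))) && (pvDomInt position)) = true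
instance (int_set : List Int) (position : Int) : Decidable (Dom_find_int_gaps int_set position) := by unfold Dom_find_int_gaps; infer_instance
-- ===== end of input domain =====

-- B replaces A's membership-probe upward scan by sort-the-relevant-values-then-single-pass gap search (alternative algorithm, same result).


-- ===== PORT A =====
-- termination measure for A's while loop: each step consumes one distinct value ≥ position from int_set
theorem pvGapsMeasure (int_set : List Int) (position : Int) (h : position ∈ int_set) :
    (int_set.filter (fun x => decide (position + 1 ≤ x))).length <
      (int_set.filter (fun x => decide (position ≤ x))).length := by
  induction int_set with
  | nil => cases h
  | cons a t ih =>
    rcases List.mem_cons.mp h with rfl | hm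
    · rw [List.filter_cons, List.filter_cons,
        decide_eq_true (le_refl position), decide_eq_false (by omega : ¬ position + 1 ≤ position),
        if_pos rfl, if_neg Bool.false_ne_true]
      simp only [List.length_cons]
      have : (t.filter (fun x => decide (position + 1 ≤ x))).length ≤
          (t.filter (fun x => decide (position ≤ x))).length := by
        apply List.Sublist.length_le
        apply List.monotone_filter_right
        intro x hx
        simp only [decide_eq_true_eq] at hx ⊢
        omega
      omega
    · have := ih hm
      rw [List.filter_cons, List.filter_cons]
      by_cases h1 : position + 1 ≤ a
      · have h2 : position ≤ a := by omega
        rw [decide_eq_true h1, decide_eq_true h2, if_pos rfl, if_pos rfl]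
        simp only [List.length_cons]; omega
      · by_cases h2 : position ≤ a
        · rw [decide_eq_false h1, decide_eq_true h2, if_neg Bool.false_ne_true, if_pos rfl]
          simp only [List.length_cons]; omega
        · rw [decide_eq_false h1, decide_eq_false h2, if_neg Bool.false_ne_true,
            if_neg Bool.false_ne_true]
          omega

-- while position in int_set: position += 1; else return position
def find_int_gaps (int_set : List Int) (position : Int) : Int :=
  if position ∈ int_set then find_int_gaps int_set (position + 1) else position
termination_by (int_set.filter (fun x => decide (position ≤ x))).length
decreasing_by exact pvGapsMeasure int_set position (by assumption)

-- ===== PORT B =====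
-- the single pass over the sorted relevant values with the 'expected' accumulator
def gapWalk (s : List Int) (expected : Int) : Int :=
  match s with
  | [] => expected
  | v :: rest =>
    if v = expected then gapWalk rest (expected + 1)
    else if expected < v then expected
    else gapWalk rest expected

def find_int_gaps_alt (int_set : List Int) (position : Int) : Int :=
  gapWalk (PySem.List.sorted (int_set.filter (fun x => decide (position ≤ x))) (fun x => x) false) position

-- ===== PRECONDITION & SPEC =====
def Spec_find_int_gaps (int_set : List Int) (position : Int) (out : Int) : Prop := out = find_int_gaps_alt int_set position
instance (int_set : List Int) (position : Int) (out : Int) : Decidable (Spec_find_int_gaps int_set position out) := by unfold Spec_find_int_gaps; infer_instance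

-- ===== CLAIM (what is proved, stated in full; the proofs are below) =====
def Claim_equal_find_int_gaps : Prop := ∀ (int_set : List Int) (position : Int), Dom_find_int_gaps int_set position → Spec_find_int_gaps int_set position (find_int_gaps int_set position)

-- ===== LEMMAS AND PROOFS =====

-- A's result: first integer ≥ position missing from int_set
theorem findA_spec (int_set : List Int) (position : Int) :
    position ≤ find_int_gaps int_set position ∧
    find_int_gaps int_set position ∉ int_set ∧
    (∀ q : Int, position ≤ q → q < find_int_gaps int_set position → q ∈ int_set) := by
  induction position using find_int_gaps.induct int_set with
  | case1 p hmem ih =>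
    rw [find_int_gaps, if_pos hmem]
    refine ⟨by omega, ih.2.1, ?_⟩
    intro q hq1 hq2
    rcases eq_or_lt_of_le hq1 with rfl | h
    · exact hmem
    · exact ih.2.2 q (by omega) hq2
  | case2 p hmem =>
    rw [find_int_gaps, if_neg hmem]
    exact ⟨le_refl _, hmem, fun q h1 h2 => absurd (lt_of_le_of_lt h1 h2) (lt_irrefl p)⟩

theorem gapWalk_ge (s : List Int) (e : Int) : e ≤ gapWalk s e := by
  induction s generalizing e with
  | nil => simp [gapWalk]
  | cons v rest ih =>
    rw [gapWalk]
    split_ifs with h1 h2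
    · have := ih (e + 1); omega
    · omega
    · exact ih e

theorem gapWalk_not_mem (s : List Int) (e : Int) (hs : s.Pairwise (· ≤ ·)) :
    gapWalk s e ∉ s := by
  induction s generalizing e with
  | nil => simp
  | cons v rest ih =>
    have hp := List.pairwise_cons.mp hs
    rw [gapWalk]
    split_ifs with h1 h2
    · intro hm
      rcases List.mem_cons.mp hm with heq | hm'
      · have := gapWalk_ge rest (e + 1); omega
      · exact ih (e + 1) hp.2 hm'
    · intro hm
      rcases List.mem_cons.mp hm with heq | hm'
      · omega
      · have := hp.1 e hm'; omega
    · intro hm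
      rcases List.mem_cons.mp hm with heq | hm'
      · have := gapWalk_ge rest e; omega
      · exact ih e hp.2 hm'

theorem gapWalk_mem_of_lt (s : List Int) (e : Int) :
    ∀ q : Int, e ≤ q → q < gapWalk s e → q ∈ s := by
  induction s generalizing e with
  | nil => intro q h1 h2; simp [gapWalk] at h2; omega
  | cons v rest ih =>
    intro q h1 h2
    rw [gapWalk] at h2
    split_ifs at h2 with hv1 hv2
    · rcases eq_or_lt_of_le h1 with rfl | h
      · exact List.mem_cons.mpr (Or.inl hv1.symm)
      · exact List.mem_cons.mpr (Or.inr (ih (e + 1) q (by omega) h2))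
    · omega
    · exact List.mem_cons.mpr (Or.inr (ih e q h1 h2))

-- B's result: first integer ≥ position missing from int_set
theorem findB_spec (int_set : List Int) (position : Int) :
    position ≤ find_int_gaps_alt int_set position ∧
    find_int_gaps_alt int_set position ∉ int_set ∧
    (∀ q : Int, position ≤ q → q < find_int_gaps_alt int_set position → q ∈ int_set) := by
  unfold find_int_gaps_alt
  set s := PySem.List.sorted (int_set.filter (fun x => decide (position ≤ x))) (fun x => x) false with hsdef
  have hmem : ∀ q : Int, q ∈ s ↔ (q ∈ int_set ∧ position ≤ q) := by
    intro q
    rw [hsdef, PySem.List.mem_sorted, List.mem_filter]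
    simp
  have hpw : s.Pairwise (· ≤ ·) := by
    have := PySem.List.sorted_pairwise (int_set.filter (fun x => decide (position ≤ x))) (fun x => x)
    exact this
  refine ⟨gapWalk_ge s position, ?_, ?_⟩
  · intro hc
    have hge := gapWalk_ge s position
    exact gapWalk_not_mem s position hpw ((hmem _).mpr ⟨hc, hge⟩)
  · intro q h1 h2
    exact ((hmem q).mp (gapWalk_mem_of_lt s position q h1 h2)).1

-- ===== VERDICT (by name: the statement is the Claim_ definition above) =====
theorem find_int_gaps_spec : Claim_equal_find_int_gaps := by
  intro int_set position _
  unfold Spec_find_int_gaps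
  obtain ⟨ha1, ha2, ha3⟩ := findA_spec int_set position
  obtain ⟨hb1, hb2, hb3⟩ := findB_spec int_set position
  by_contra hne
  rcases lt_or_gt_of_ne hne with h | h
  · exact ha2 (hb3 _ ha1 h)
  · exact hb2 (ha3 _ hb1 h)
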